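-- pv_equiv track=rewrite | github.com/egaeus/training | python3/CF788A.py | f
-- ===== SOURCE A (Python) =====
-- def f(list):
--     listA = []
--     listB = [0]
--     res = 0
--     for i in range(len(list)):
--         res = max(res, list[i])
--         if i%2==0:
--             if len(listA) > 0:
--                 listA.append(list[i]+listA[len(listA)-1])
--             else:
--                 listA.append(list[i])
--         else:
--             if len(listB) > 0:
--                 listB.append(list[i]+listB[len(listB)-1])
--             else:
--                 listB.append(list[i])
--     s = 0
--     for i in range(len(listA)):
--         if i > 0:
--             s = max(s, listB[i]-listA[i-1])
--         res = max(res, listA[i] - listB[i] + s)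
--     return res
-- ===== SOURCE B (Python) =====
-- def f(list):
--     res = 0
--     cur = 0  # at even i: best alt-sum of an even-start subarray ending at i; at odd i: that value minus list[i]
--     for i, x in enumerate(list):
--         if x > res:
--             res = x
--         if i % 2 == 0:
--             cur = (cur if cur > 0 else 0) + x
--             if cur > res:
--                 res = cur
--         else:
--             cur = cur - x
--     return res
-- ===== Notes on version B (the rewrite author's own statement) =====
-- stated objective: faster
-- what changed: Replaced A's two prefix-sum arrays (even/odd cumulative sums) plus a second combining pass by a single Kadane-style pass that keeps one running best-subarray value and the global maximum in O(1) extra space.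
import Mathlib
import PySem

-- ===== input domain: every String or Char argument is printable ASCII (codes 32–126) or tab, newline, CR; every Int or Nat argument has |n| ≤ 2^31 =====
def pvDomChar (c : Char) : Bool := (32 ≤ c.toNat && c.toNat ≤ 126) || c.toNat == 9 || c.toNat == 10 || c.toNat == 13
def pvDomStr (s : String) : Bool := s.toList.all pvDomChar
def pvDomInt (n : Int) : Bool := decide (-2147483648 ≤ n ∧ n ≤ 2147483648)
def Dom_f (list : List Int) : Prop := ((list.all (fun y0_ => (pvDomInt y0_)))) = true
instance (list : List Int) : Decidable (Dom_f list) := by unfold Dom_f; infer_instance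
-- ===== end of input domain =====

-- B replaces A's two prefix-sum arrays and second combining pass by a single Kadane-style pass (one loop, O(1) extra space; measured constant-factor faster).

-- ===== PORT A =====
def f (list : List Int) : Int :=
  let st := (PySem.List.pyRange 0 (list.length : Int) 1).foldl
    (fun (st : Int × List Int × List Int) i =>
      let res := max st.1 (PySem.List.pyGetD list i 0)
      let listA := st.2.1
      let listB := st.2.2
      if PySem.Int.mod i 2 = 0 then
        if 0 < listA.length then
          (res, listA ++ [PySem.List.pyGetD list i 0 +
            PySem.List.pyGetD listA ((listA.length : Int) - 1) 0], listB)
        else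
          (res, listA ++ [PySem.List.pyGetD list i 0], listB)
      else
        if 0 < listB.length then
          (res, listA, listB ++ [PySem.List.pyGetD list i 0 +
            PySem.List.pyGetD listB ((listB.length : Int) - 1) 0])
        else
          (res, listA, listB ++ [PySem.List.pyGetD list i 0]))
    (0, [], [0])
  let listA := st.2.1
  let listB := st.2.2
  let st2 := (PySem.List.pyRange 0 (listA.length : Int) 1).foldl
    (fun (p : Int × Int) i =>
      let s := if 0 < i then
          max p.2 (PySem.List.pyGetD listB i 0 - PySem.List.pyGetD listA (i - 1) 0)
        else p.2
      (max p.1 (PySem.List.pyGetD listA i 0 - PySem.List.pyGetD listB i 0 + s), s))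
    (st.1, 0)
  st2.1

-- ===== PORT B =====
def f_alt (list : List Int) : Int :=
  ((PySem.List.enumerate list 0).foldl
    (fun (st : Int × Int) p =>
      let res := if p.2 > st.1 then p.2 else st.1
      if PySem.Int.mod p.1 2 = 0 then
        let cur := (if st.2 > 0 then st.2 else 0) + p.2
        (if cur > res then cur else res, cur)
      else
        (res, st.2 - p.2))
    (0, 0)).1

-- ===== PRECONDITION & SPEC =====
def Spec_f (list : List Int) (out : Int) : Prop := out = f_alt list
instance (list : List Int) (out : Int) : Decidable (Spec_f list out) := by unfold Spec_f; infer_instance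

-- ===== CLAIM (what is proved, stated in full; the proofs are below) =====
def Claim_equal_f : Prop := ∀ (list : List Int), Dom_f list → Spec_f list (f list)

-- ===== LEMMAS AND PROOFS =====

-- element k of the input (0 beyond the end)
def pvG (l : List Int) (k : Nat) : Int := l.getD k 0

-- A's listA entries: cumulative sums of even-indexed elements
def pvE (l : List Int) : Nat → Int
  | 0 => pvG l 0
  | k + 1 => pvE l k + pvG l (2 * k + 2)

-- A's listB entries: 0 then cumulative sums of odd-indexed elements
def pvO (l : List Int) : Nat → Int
  | 0 => 0
  | k + 1 => pvO l k + pvG l (2 * k + 1)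

-- A's phase-2 running s after iterations 0..k
def pvS (l : List Int) : Nat → Int
  | 0 => 0
  | k + 1 => max (pvS l k) (pvO l (k + 1) - pvE l k)

-- B's cur after even index 2k
def pvC (l : List Int) : Nat → Int
  | 0 => pvG l 0
  | k + 1 => max (pvC l k - pvG l (2 * k + 1)) 0 + pvG l (2 * k + 2)

-- running max of the first k elements, starting from 0
def pvR (l : List Int) : Nat → Int
  | 0 => 0
  | k + 1 => max (pvR l k) (pvG l k)

-- A's phase-2 res after k iterations, from base
def pvP (l : List Int) : Nat → Int → Int
  | 0, base => base
  | k + 1, base => max (pvP l k base) (pvE l k - pvO l k + pvS l k)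

-- B's loop body, indexed form
def pvBody (l : List Int) (j : Nat) (st : Int × Int) : Int × Int :=
  let res := if pvG l j > st.1 then pvG l j else st.1
  if j % 2 = 0 then
    let cur := (if st.2 > 0 then st.2 else 0) + pvG l j
    (if cur > res then cur else res, cur)
  else
    (res, st.2 - pvG l j)

-- B's state after the first j elements
def pvBB (l : List Int) : Nat → Int × Int
  | 0 => (0, 0)
  | j + 1 => pvBody l j (pvBB l j)

lemma pvP_max (l : List Int) (k : Nat) (u v : Int) :
    pvP l k (max u v) = max (pvP l k u) v := by
  induction k with
  | zero => rfl
  | succ k ih => simp [pvP, ih]; omega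

lemma pvC_eq (l : List Int) (k : Nat) :
    pvC l k = pvE l k - pvO l k + pvS l k := by
  induction k with
  | zero => simp [pvC, pvE, pvO, pvS]
  | succ k ih => simp [pvC, pvE, pvO, pvS, ih]; omega


lemma pvBB_odd (l : List Int) (k : Nat) :
    pvBB l (2 * k + 1) = (pvP l (k + 1) (pvR l (2 * k + 1)), pvC l k) := by
  induction k with
  | zero =>
    simp [pvBB, pvBody, pvP, pvR, pvS, pvE, pvO, pvC, pvG]
    split_ifs <;> omega
  | succ k ih =>
    have e : 2 * (k + 1) + 1 = (2 * k + 1) + 1 + 1 := by ring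
    rw [e, pvBB, pvBB, ih]
    have h2 : ((2 * k + 1 + 1) % 2 = 0) := by omega
    have e2 : 2 * k + 1 + 1 = 2 * k + 2 := by ring
    simp [pvBody, h2, e2]
    have hC : pvC l (k + 1) = max (pvC l k - pvG l (2 * k + 1)) 0 + pvG l (2 * k + 2) := rfl
    have hCe : pvE l (k + 1) - pvO l (k + 1) + pvS l (k + 1) = pvC l (k + 1) := (pvC_eq l (k + 1)).symm
    have e3 : 2 * k + 2 + 1 = 2 * (k + 1) + 1 := by ring
    have hR2 : pvR l (2 * k + 1 + 1) = max (pvR l (2 * k + 1)) (pvG l (2 * k + 1)) := rfl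
    have hR3 : pvR l (2 * k + 2 + 1) = max (pvR l (2 * k + 1 + 1)) (pvG l (2 * k + 1 + 1)) := by
      rw [e2]; rfl
    have hP : pvP l (k + 1 + 1) (pvR l (2 * k + 2 + 1)) =
        max (max (max (pvP l (k + 1) (pvR l (2 * k + 1))) (pvG l (2 * k + 1))) (pvG l (2 * k + 2)))
          (pvE l (k + 1) - pvO l (k + 1) + pvS l (k + 1)) := by
      rw [pvP, hR3, hR2, e2, pvP_max, pvP_max]
    rw [hP, hCe, hC]
    constructor
    · split_ifs <;> simp [Int.max_def] <;> split_ifs <;> omega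
    · simp [Int.max_def]; split_ifs <;> omega

lemma pv_mod2 (k : Nat) : (PySem.Int.mod (k : Int) 2 = 0) = (k % 2 = 0) := by
  have h : PySem.Int.mod (k : Int) 2 = ((k % 2 : Nat) : Int) := by
    exact_mod_cast PySem.Int.mod_natCast k 2
  rw [h]
  simp only [Int.natCast_eq_zero]

lemma foldB_eq_pvBB (l : List Int) (j : Nat) :
    (List.range j).foldl (fun (st : Int × Int) (k : Nat) =>
      let p : Int × Int := ((k : Int), pvG l k)
      let res := if p.2 > st.1 then p.2 else st.1
      if PySem.Int.mod p.1 2 = 0 then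
        let cur := (if st.2 > 0 then st.2 else 0) + p.2
        (if cur > res then cur else res, cur)
      else (res, st.2 - p.2)) (0, 0) = pvBB l j := by
  induction j with
  | zero => rfl
  | succ j ih =>
    rw [List.range_succ, List.foldl_append, ih, List.foldl_cons, List.foldl_nil]
    show _ = pvBody l j (pvBB l j)
    simp only [pvBody, pv_mod2]

lemma f_alt_eq (l : List Int) :
    f_alt l = pvP l ((l.length + 1) / 2) (pvR l l.length) := by
  have h1 : f_alt l = (pvBB l l.length).1 := by
    unfold f_alt
    rw [PySem.List.enumerate_eq_map_pyRange (d := 0)]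
    simp only [PySem.List.len_eq, PySem.List.pyRange_zero_natCast, List.map_map, List.foldl_map]
    rw [← foldB_eq_pvBB l l.length]
    simp [pvG, Function.comp]
  rw [h1]
  rcases Nat.even_or_odd l.length with ⟨k, hk⟩ | ⟨k, hk⟩
  · rcases Nat.eq_zero_or_pos k with rfl | hpos
    · simp at hk; rw [hk]; rfl
    · obtain ⟨k', rfl⟩ : ∃ k', k = k' + 1 := ⟨k - 1, by omega⟩
      have e : l.length = (2 * k' + 1) + 1 := by omega
      rw [e, pvBB, pvBB_odd]
      have h2 : ¬ ((2 * k' + 1) % 2 = 0) := by omega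
      simp only [pvBody, h2, if_false]
      have em : (2 * k' + 1 + 1 + 1) / 2 = k' + 1 := by omega
      have hr : pvR l (2 * k' + 1 + 1) = max (pvR l (2 * k' + 1)) (pvG l (2 * k' + 1)) := rfl
      rw [em, hr, pvP_max]
      split_ifs <;> simp [Int.max_def] <;> omega
  · have e : l.length = 2 * k + 1 := by omega
    rw [e, pvBB_odd]
    have em : (2 * k + 1 + 1) / 2 = k + 1 := by omega
    rw [em]



lemma pvG_def (l : List Int) (k : Nat) : l.getD k 0 = pvG l k := rfl

lemma phase1 (l : List Int) (j : Nat) :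
    (List.range j).foldl (fun (x : Int × List Int × List Int) (y : Nat) =>
      if PySem.Int.mod (y : Int) 2 = 0 then
        if 0 < x.2.1.length then
          (max x.1 (pvG l y), x.2.1 ++ [pvG l y + PySem.List.pyGetD x.2.1 ((x.2.1.length : Int) - 1) 0], x.2.2)
        else (max x.1 (pvG l y), x.2.1 ++ [pvG l y], x.2.2)
      else
        if 0 < x.2.2.length then
          (max x.1 (pvG l y), x.2.1, x.2.2 ++ [pvG l y + PySem.List.pyGetD x.2.2 ((x.2.2.length : Int) - 1) 0])
        else (max x.1 (pvG l y), x.2.1, x.2.2 ++ [pvG l y]))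
      (0, [], [0])
    = (pvR l j, (List.range ((j + 1) / 2)).map (pvE l), (List.range (j / 2 + 1)).map (pvO l)) := by
  induction j with
  | zero => rfl
  | succ j ih =>
    rw [List.range_succ, List.foldl_append, ih, List.foldl_cons, List.foldl_nil]
    simp only [pv_mod2]
    rcases Nat.even_or_odd j with ⟨k, hk⟩ | ⟨k, hk⟩
    · -- j = 2k even
      have hj : j = 2 * k := by omega
      subst hj
      have hpar : (2 * k) % 2 = 0 := by omega
      have hA : (2 * k + 1) / 2 = k := by omega
      have hA' : (2 * k + 1 + 1) / 2 = k + 1 := by omega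
      simp only [hpar, if_true, hA, hA', List.length_map, List.length_range]
      by_cases hk0 : 0 < k
      · obtain ⟨k', rfl⟩ : ∃ k', k = k' + 1 := ⟨k - 1, by omega⟩
        have hcast : (((k' + 1 : Nat) : Int) - 1) = ((k' : Nat) : Int) := by push_cast; ring
        rw [if_pos hk0, hcast, PySem.List.pyGetD_natCast,
          PySem.List.getD_map_range _ _ _ _ (by omega)]
        have hB2 : 2 * (k' + 1) / 2 + 1 = k' + 1 + 1 := by omega
        simp only [Prod.mk.injEq, hB2]
        refine ⟨rfl, ?_, trivial⟩
        have h2 : 2 * (k' + 1) = 2 * k' + 2 := by ring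
        rw [h2]
        simp [List.range_succ]
        rw [pvE]
        ring
      · have hk00 : k = 0 := by omega
        subst hk00
        rw [if_neg hk0]
        rfl
    · -- j = 2k+1 odd
      have hj : j = 2 * k + 1 := by omega
      subst hj
      have hpar : ¬ ((2 * k + 1) % 2 = 0) := by omega
      have hA : (2 * k + 1 + 1) / 2 = k + 1 := by omega
      have hA' : (2 * k + 1 + 1 + 1) / 2 = k + 1 := by omega
      have hB : (2 * k + 1) / 2 + 1 = k + 1 := by omega
      simp only [hpar, if_false, hA, hA', hB, List.length_map, List.length_range]
      rw [if_pos (by omega : 0 < k + 1)]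
      have hcast : (((k + 1 : Nat) : Int) - 1) = ((k : Nat) : Int) := by push_cast; ring
      rw [hcast, PySem.List.pyGetD_natCast, PySem.List.getD_map_range _ _ _ _ (by omega)]
      simp only [Prod.mk.injEq]
      refine ⟨rfl, trivial, ?_⟩
      simp [List.range_succ]
      rw [pvO]
      ring


lemma phase2 (l LA LB : List Int) (base : Int) (j : Nat)
    (hLA : ∀ k, k < j → pvG LA k = pvE l k)
    (hLB : ∀ k, k < j → pvG LB k = pvO l k)
    (hLA1 : ∀ k, 0 < k → k < j → PySem.List.pyGetD LA ((k : Int) - 1) 0 = pvE l (k - 1)) :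
    (List.range j).foldl (fun (x : Int × Int) (y : Nat) =>
      (max x.1 (pvG LA y - pvG LB y
          + if 0 < (y : Int) then
              max x.2 (pvG LB y - PySem.List.pyGetD LA ((y : Int) - 1) 0)
            else x.2),
        if 0 < (y : Int) then
          max x.2 (pvG LB y - PySem.List.pyGetD LA ((y : Int) - 1) 0)
        else x.2))
      (base, 0)
    = (pvP l j base, pvS l (j - 1)) := by
  induction j with
  | zero => rfl
  | succ j ih =>
    rw [List.range_succ, List.foldl_append,
      ih (fun k hk => hLA k (by omega)) (fun k hk => hLB k (by omega))
        (fun k h0 hk => hLA1 k h0 (by omega)),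
      List.foldl_cons, List.foldl_nil]
    rw [hLA j (by omega), hLB j (by omega)]
    rcases Nat.eq_zero_or_pos j with rfl | hj0
    · norm_num
      rfl
    · rw [if_pos (by exact_mod_cast hj0), hLA1 j hj0 (by omega)]
      obtain ⟨j', rfl⟩ : ∃ j', j = j' + 1 := ⟨j - 1, by omega⟩
      simp only [Nat.add_sub_cancel, Prod.mk.injEq]
      have hs : max (pvS l j') (pvO l (j' + 1) - pvE l j') = pvS l (j' + 1) := rfl
      rw [hs]
      constructor
      · show _ = pvP l (j' + 1 + 1) base
        rfl
      · rfl

lemma f_eq (l : List Int) :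
    f l = pvP l ((l.length + 1) / 2) (pvR l l.length) := by
  unfold f
  simp only [PySem.List.pyRange_zero_natCast, List.foldl_map, PySem.List.pyGetD_natCast,
    pvG_def]
  rw [phase1 l l.length]
  simp only [List.length_map, List.length_range]
  rw [phase2 l ((List.range ((l.length + 1) / 2)).map (pvE l))
        ((List.range (l.length / 2 + 1)).map (pvO l)) (pvR l l.length) ((l.length + 1) / 2)
        (fun k hk => by rw [← pvG_def]; exact PySem.List.getD_map_range _ _ _ _ hk)
        (fun k hk => by
          rw [← pvG_def]; exact PySem.List.getD_map_range _ _ _ _ (by omega))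
        (fun k h0 hk => by
          have hcast : ((k : Nat) : Int) - 1 = ((k - 1 : Nat) : Int) := by omega
          rw [hcast, PySem.List.pyGetD_natCast]
          exact PySem.List.getD_map_range _ _ _ _ (by omega))]

-- ===== VERDICT (by name: the statement is the Claim_ definition above) =====
theorem f_spec : Claim_equal_f := by
  intro l _
  unfold Spec_f
  rw [f_eq, f_alt_eq]
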